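-- pv_equiv track=rewrite | github.com/rodrigo-castellano/keras_ns_grounders | experiments/other_scripts/ultra_utils_recent_old.py | split_corruptions
-- ===== SOURCE A (Python) =====
-- def split_corruptions(batch):
--     '''
--     Given a batch, split it in subbatches with the same number of corruptions in each subbatch. In this way it is easy to convert it to a pytorch version.
--     '''
--     n_queries = len(batch)
--     subbatches = {}
--     for i in range(n_queries):
--         n_corruptions = len(batch[i])
--         if n_corruptions not in subbatches:
--             subbatches[n_corruptions] = []
--         subbatches[n_corruptions].append([batch[i]])
--     return subbatches
-- ===== SOURCE B (Python) =====
-- def split_corruptions(batch):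
--     counts = [len(q) for q in batch]
--     keys = list(dict.fromkeys(counts))
--     return {k: [[q] for q in batch if len(q) == k] for k in keys}
-- ===== Notes on version B (the rewrite author's own statement) =====
-- stated objective: alternative
-- what changed: B replaces A's single hashing pass that appends into a dict with a two-pass decomposition: first an ordered dedup of the corruption counts, then one filter pass per distinct count building each group directly.
import Mathlib
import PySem

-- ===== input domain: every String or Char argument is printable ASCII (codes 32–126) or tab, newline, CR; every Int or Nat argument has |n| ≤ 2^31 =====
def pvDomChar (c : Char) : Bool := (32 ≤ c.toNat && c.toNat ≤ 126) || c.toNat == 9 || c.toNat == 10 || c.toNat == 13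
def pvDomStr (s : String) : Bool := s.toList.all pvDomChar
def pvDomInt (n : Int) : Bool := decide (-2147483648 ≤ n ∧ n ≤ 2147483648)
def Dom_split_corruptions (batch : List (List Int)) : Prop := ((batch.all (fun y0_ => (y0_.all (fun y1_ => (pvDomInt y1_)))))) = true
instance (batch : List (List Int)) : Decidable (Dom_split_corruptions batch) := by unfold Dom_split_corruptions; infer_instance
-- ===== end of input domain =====

-- B replaces A's single hashing pass with an ordered dedup of the corruption counts followed by one filter pass per
-- distinct count; same return value (same key order), alternative decomposition, no speed claim.

-- ===== PORT A =====
def split_corruptions (batch : List (List Int)) : List (Int × List (List (List Int))) :=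
  let n_queries : Int := PySem.List.len batch
  (((PySem.List.pyRange 0 n_queries).foldl (fun d i =>
      let q := PySem.List.pyGetD batch i []
      let n_corruptions : Int := PySem.List.len q
      let d := if d.contains n_corruptions then d
               else d.insert n_corruptions ([] : List (List (List Int)))
      d.modify n_corruptions [] (fun l => l ++ [[q]]))
    (PySem.Dict.empty : PySem.Dict Int (List (List (List Int)))))).items

-- ===== PORT B =====
def split_corruptions_alt (batch : List (List Int)) : List (Int × List (List (List Int))) :=
  let counts := batch.map (fun q => PySem.List.len q)
  let keys := PySem.List.dedup counts
  keys.map (fun k => (k, (batch.filter (fun q => PySem.List.len q == k)).map (fun q => [q])))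

-- ===== PRECONDITION & SPEC =====
def Spec_split_corruptions (batch : List (List Int)) (out : List (Int × List (List (List Int)))) : Prop := out = split_corruptions_alt batch
instance (batch : List (List Int)) (out : List (Int × List (List (List Int)))) : Decidable (Spec_split_corruptions batch out) := by unfold Spec_split_corruptions; infer_instance

-- ===== CLAIM (what is proved, stated in full; the proofs are below) =====
def Claim_equal_split_corruptions : Prop := ∀ (batch : List (List Int)), Dom_split_corruptions batch → Spec_split_corruptions batch (split_corruptions batch)

-- ===== LEMMAS AND PROOFS =====

-- A's "if missing, insert []; then append" step is one `modify`.
theorem step_eq_modify (d : PySem.Dict Int (List (List (List Int)))) (n : Int)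
    (f : List (List (List Int)) → List (List (List Int))) :
    (if d.contains n then d else d.insert n []).modify n [] f = d.modify n [] f := by
  by_cases h : d.contains n = true
  · simp [h]
  · simp only [Bool.not_eq_true] at h
    simp [h, PySem.Dict.modify, PySem.Dict.getD_insert_self,
      PySem.Dict.insert_insert_self, PySem.Dict.getD_of_not_contains d [] h]

theorem split_corruptions_spec : Claim_equal_split_corruptions := by
  intro batch _
  unfold Spec_split_corruptions split_corruptions split_corruptions_alt
  simp only []
  -- turn the index loop into a fold over the list itself
  rw [show (fun (d : PySem.Dict Int (List (List (List Int)))) (i : Int) =>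
        (if d.contains (PySem.List.len (PySem.List.pyGetD batch i [])) then d
         else d.insert (PySem.List.len (PySem.List.pyGetD batch i [])) []).modify
          (PySem.List.len (PySem.List.pyGetD batch i [])) []
          (fun l => l ++ [[PySem.List.pyGetD batch i []]]))
      = (fun d i =>
          (fun (d : PySem.Dict Int (List (List (List Int)))) (q : List Int) =>
            d.modify (PySem.List.len q) [] (fun l => l ++ [[q]])) d (PySem.List.pyGetD batch i []))
      from funext fun d => funext fun i => step_eq_modify _ _ _]
  rw [PySem.List.foldl_pyRange_pyGetD batch []
    (fun (d : PySem.Dict Int (List (List (List Int)))) (q : List Int) =>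
      d.modify (PySem.List.len q) [] (fun l => l ++ [[q]]))
    PySem.Dict.empty (le_refl 0)]
  simp only [Int.toNat_zero, List.drop_zero]
  -- fold over pairs (len q, [q])
  have hfold : (batch.foldl (fun (d : PySem.Dict Int (List (List (List Int)))) q =>
        d.modify (PySem.List.len q) [] (fun l => l ++ [[q]])) PySem.Dict.empty)
      = ((batch.map (fun q => (PySem.List.len q, ([q] : List (List Int))))).foldl
          (fun d p => d.modify p.1 [] (fun l => l ++ [p.2])) PySem.Dict.empty) := by
    rw [List.foldl_map]
  rw [hfold]
  set D := ((batch.map (fun q => (PySem.List.len q, ([q] : List (List Int))))).foldl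
          (fun d p => d.modify p.1 [] (fun l => l ++ [p.2])) PySem.Dict.empty) with hD
  have hnd : D.keys.Nodup := by
    rw [hD, List.foldl_map]
    exact PySem.Dict.nodup_keys_foldl_modify_key batch _ [] _ _ PySem.Dict.nodup_keys_empty
  have hkeys : D.keys = PySem.Set.ofList (batch.map (fun q => PySem.List.len q)) := by
    rw [hD, List.foldl_map]
    rw [PySem.Dict.keys_foldl_modify_key batch (fun q => PySem.List.len q) []
      (fun _ q => fun l => l ++ [[q]]) PySem.Dict.empty]
    simp [PySem.Dict.keys_empty, PySem.Set.update_nil_left]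
  rw [PySem.Dict.items_eq_map_keys D hnd [], hkeys, PySem.List.dedup_eq_ofList]
  refine List.map_congr_left (fun k hk => ?_)
  have hgetD : D.getD k [] = ((batch.map (fun q => (PySem.List.len q, ([q] : List (List Int))))).filter
      (fun p => p.1 == k)).map (fun p => p.2) := by
    rw [hD, PySem.Dict.getD_foldl_modify_append]
    simp [PySem.Dict.getD_empty]
  rw [hgetD, List.filter_map]
  simp [Function.comp_def]

-- ===== VERDICT (by name: the statement is the Claim_ definition above) =====
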